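-- pv_equiv track=rewrite | github.com/dong-3-hoon/Algo | daily/2302/230207/swea_1210_ladder.py | dfs
-- ===== SOURCE A (Python) =====
-- def dfs(x, y, n_ladder, st):
--     #도착점에 도달했을 시 시작 y값을 리턴
--     if n_ladder[x][y] == 2:
--         return st
--     #탐색한 사다리에는 3을 저장해서 다음 탐색시 배제
--     n_ladder[x][y] = 3
--     #벡터는 우 좌 하를 탐색
--     dx = [0, 0, 1]
--     dy = [1, -1, 0]
--     for i in range(3):
--         nx, ny = x + dx[i], y + dy[i]
--         # 사다리의 끝에 도달하면 -1을 바로 리턴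
--         if nx == 100:
--             return -1
--         #인덱스 에러 제거 및 사다리의 1이나 2를 탐색
--         if 0 <= nx < 100 and 0 <= ny < 100 and (n_ladder[nx][ny] == 1 or n_ladder[nx][ny] == 2):
--             k = dfs(nx, ny, n_ladder, st)
--             #리턴값이 -1이면 사다리를 모두 탐색했으므로 빠르게 종료
--             if k == -1:
--                 return -1
--             if k == st:
--                 return st
-- ===== SOURCE B (Python) =====
-- # Iterative re-implementation of the recursive ladder DFS: an explicit stack of
-- # (x, y, direction-index) frames replaces the Python call stack.  Same return
-- # values and the same in-place marking of visited cells with 3, in the same order.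
-- def dfs(x, y, n_ladder, st):
--     stack = [(x, y, 0)]
--     while stack:
--         cx, cy, i = stack.pop()
--         if i == 0:
--             if n_ladder[cx][cy] == 2:
--                 return st
--             n_ladder[cx][cy] = 3
--         if i == 3:
--             continue
--         nx = cx + 1 if i == 2 else cx
--         ny = cy + 1 if i == 0 else cy - 1 if i == 1 else cy
--         if nx == 100:
--             return -1
--         stack.append((cx, cy, i + 1))
--         if 0 <= nx < 100 and 0 <= ny < 100 and (n_ladder[nx][ny] == 1 or n_ladder[nx][ny] == 2):
--             stack.append((nx, ny, 0))
--     return None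
-- ===== Notes on version B (the rewrite author's own statement) =====
-- stated objective: alternative
-- what changed: The recursive DFS is replaced by an iterative DFS driven by an explicit stack of (x, y, direction-index) frames: the Python call stack disappears and st/-1/None are produced directly by the loop instead of propagating up recursive returns, while the same cells are visited and marked 3 in the same preorder.
-- outside the precondition, e.g. on dfs(0, 0, [[1, 2]], 5): A returns 5, B returns 5
import Mathlib
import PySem

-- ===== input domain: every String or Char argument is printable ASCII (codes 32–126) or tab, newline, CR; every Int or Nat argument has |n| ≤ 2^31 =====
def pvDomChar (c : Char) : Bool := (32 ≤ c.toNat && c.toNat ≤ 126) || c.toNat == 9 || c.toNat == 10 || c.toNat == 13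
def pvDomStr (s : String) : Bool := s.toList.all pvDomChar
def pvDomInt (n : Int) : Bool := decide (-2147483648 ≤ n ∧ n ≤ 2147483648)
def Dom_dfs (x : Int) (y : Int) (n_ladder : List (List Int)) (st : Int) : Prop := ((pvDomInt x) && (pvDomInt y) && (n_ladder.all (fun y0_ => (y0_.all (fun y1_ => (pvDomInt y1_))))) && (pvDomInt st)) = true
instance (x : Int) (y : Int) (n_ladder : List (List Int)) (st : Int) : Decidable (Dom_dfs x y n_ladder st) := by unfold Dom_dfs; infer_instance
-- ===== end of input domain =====

-- B replaces the recursive DFS by an iterative DFS over an explicit stack of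
-- (x, y, direction-index) frames (objective: alternative, no speed claim).
-- A mutates n_ladder in place (marking visited cells 3); B performs the same
-- mutation in the same order; the equivalence proved here is about the return value.

-- ===== PORT A =====
-- n_ladder[x][y] read / write with Python's negative-index wraparound; exact for
-- every in-range (possibly negative) index, which is all Pre_dfs admits.
def pvNat (n : Int) (len : Nat) : Nat := if n < 0 then (n + len).toNat else n.toNat
def pvCell (g : List (List Int)) (x y : Int) : Int :=
  (g.getD (pvNat x g.length) []).getD
    (pvNat y (g.getD (pvNat x g.length) []).length) 0
def pvSet3 (g : List (List Int)) (x y : Int) (v : Int) : List (List Int) :=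
  g.set (pvNat x g.length)
    ((g.getD (pvNat x g.length) []).set
      (pvNat y (g.getD (pvNat x g.length) []).length) v)
-- number of cells holding 1 or 2 (used only as recursion fuel; proved sufficient below)
def pvRowCount (r : List Int) : Nat := (r.filter (fun v => v == 1 || v == 2)).length
def pvCount12 (g : List (List Int)) : Nat := (g.map pvRowCount).sum

mutual
-- literal port of A's body; fuel = recursion depth, first component none = fuel ran out
def dfsGo (st : Int) (fuel : Nat) (x y : Int) (g : List (List Int)) :
    Option (Option Int) × List (List Int) :=
  match fuel with
  | 0 => (none, g)
  | f + 1 =>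
    if pvCell g x y = 2 then (some (some st), g)
    else dfsLoop st f x y 0 (pvSet3 g x y 3)
  termination_by (fuel, 0)

-- A's "for i in range(3)" with dx = [0,0,1], dy = [1,-1,0]
def dfsLoop (st : Int) (f : Nat) (x y : Int) (i : Nat) (g : List (List Int)) :
    Option (Option Int) × List (List Int) :=
  if h : 3 ≤ i then (some none, g)
  else
    let nx : Int := x + ([0, 0, 1].getD i 0)
    let ny : Int := y + ([1, -1, 0].getD i 0)
    if nx = 100 then (some (some (-1)), g)
    else if 0 ≤ nx ∧ nx < 100 ∧ 0 ≤ ny ∧ ny < 100 ∧ (pvCell g nx ny = 1 ∨ pvCell g nx ny = 2) then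
      match dfsGo st f nx ny g with
      | (none, g') => (none, g')
      | (some k, g') =>
        if k = some (-1) then (some (some (-1)), g')
        else if k = some st then (some (some st), g')
        else dfsLoop st f x y (i + 1) g'
    else dfsLoop st f x y (i + 1) g
  termination_by (f, 4 - i)
end

def dfs (x : Int) (y : Int) (n_ladder : List (List Int)) (st : Int) : Option Int :=
  match (dfsGo st (pvCount12 n_ladder + 2) x y n_ladder).1 with
  | some r => r
  | none => none

-- ===== PORT B =====
-- literal port of Source B's while loop; fuel = loop iterations, none = fuel ran out
def runB (st : Int) (fuel : Nat) (stack : List (Int × Int × Nat)) (g : List (List Int)) :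
    Option (Option Int) :=
  match fuel with
  | 0 => none
  | f + 1 =>
    match stack with
    | [] => some none
    | (cx, cy, i) :: rest =>
      if i = 0 ∧ pvCell g cx cy = 2 then some (some st)
      else
        let g1 := if i = 0 then pvSet3 g cx cy 3 else g
        if i = 3 then runB st f rest g1
        else
          let nx : Int := if i = 2 then cx + 1 else cx
          let ny : Int := if i = 0 then cy + 1 else if i = 1 then cy - 1 else cy
          if nx = 100 then some (some (-1))
          else if 0 ≤ nx ∧ nx < 100 ∧ 0 ≤ ny ∧ ny < 100 ∧
              (pvCell g1 nx ny = 1 ∨ pvCell g1 nx ny = 2) then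
            runB st f ((nx, ny, 0) :: (cx, cy, i + 1) :: rest) g1
          else runB st f ((cx, cy, i + 1) :: rest) g1

def dfs_alt (x : Int) (y : Int) (n_ladder : List (List Int)) (st : Int) : Option Int :=
  match runB st (5 ^ (pvCount12 n_ladder + 4)) [(x, y, 0)] n_ladder with
  | some r => r
  | none => none

-- ===== PRECONDITION & SPEC =====
def Shape100 (g : List (List Int)) : Prop := g.length = 100 ∧ ∀ r ∈ g, r.length = 100

-- Python in-range index test (wraparound allowed)
def pvInb (n : Int) (len : Nat) : Prop := -(len : Int) ≤ n ∧ n < (len : Int)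

-- direction (nx,ny) is harmless on the marked board g1: either the 0 ≤ · < 100 guard
-- fails before indexing, or the cell exists and does not hold 1 (so no deeper recursion)
def pvOkDir (g1 : List (List Int)) (nx ny : Int) : Prop :=
  ¬(0 ≤ nx ∧ nx < 100 ∧ 0 ≤ ny ∧ ny < 100) ∨
  (nx.toNat < g1.length ∧ ny.toNat < (g1.getD nx.toNat []).length ∧ pvCell g1 nx ny ≠ 1)

-- A's hard-coded 0 ≤ · < 100 guards only match the board they index on the contest's
-- 100×100 board, so Pre_ is: (a) a 100×100 board with the start inside it — there A
-- always returns (proved via the fuel bound below); or (b) any other board where the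
-- start index is valid (Python wraparound allowed) and the walk stops within one step
-- (start cell 2, or every direction out of guard or not a 1-cell).  Excluded are only
-- irregular boards on which whether A raises IndexError depends on the path the walk
-- happens to take (see the cite for one such input on which A still returns).
def Pre_dfs (x : Int) (y : Int) (n_ladder : List (List Int)) (st : Int) : Prop :=
  (Shape100 n_ladder ∧ 0 ≤ x ∧ x < 100 ∧ 0 ≤ y ∧ y < 100) ∨
  (pvInb x n_ladder.length ∧
   pvInb y (n_ladder.getD (pvNat x n_ladder.length) []).length ∧
   (pvCell n_ladder x y = 2 ∨
     (pvOkDir (pvSet3 n_ladder x y 3) x (y + 1) ∧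
      pvOkDir (pvSet3 n_ladder x y 3) x (y - 1) ∧
      (x + 1 = 100 ∨ pvOkDir (pvSet3 n_ladder x y 3) (x + 1) y))))
instance (x : Int) (y : Int) (n_ladder : List (List Int)) (st : Int) :
    Decidable (Pre_dfs x y n_ladder st) := by
  unfold Pre_dfs Shape100 pvInb pvOkDir; infer_instance

def pvWitness_dfs : Int × Int × List (List Int) × Int :=
  (0, 0, List.replicate 100 (List.replicate 100 0), 7)

def Spec_dfs (x : Int) (y : Int) (n_ladder : List (List Int)) (st : Int) (out : Option Int) : Prop := out = dfs_alt x y n_ladder st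
instance (x : Int) (y : Int) (n_ladder : List (List Int)) (st : Int) (out : Option Int) : Decidable (Spec_dfs x y n_ladder st out) := by unfold Spec_dfs; infer_instance

-- ===== CLAIM (what is proved, stated in full; the proofs are below) =====
def Claim_equal_dfs : Prop := ∀ (x : Int) (y : Int) (n_ladder : List (List Int)) (st : Int), Dom_dfs x y n_ladder st → Pre_dfs x y n_ladder st → Spec_dfs x y n_ladder st (dfs x y n_ladder st)

-- ===== LEMMAS AND PROOFS =====


-- counting lemmas
lemma rowCount_cons (a : Int) (t : List Int) :
    pvRowCount (a :: t) = (if a = 1 ∨ a = 2 then 1 else 0) + pvRowCount t := by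
  simp only [pvRowCount, List.filter_cons]
  split <;> rename_i h <;> simp_all <;> omega

lemma rowCount_set_le (r : List Int) (j : Nat) : pvRowCount (r.set j 3) ≤ pvRowCount r := by
  induction r generalizing j with
  | nil => simp [pvRowCount]
  | cons a t ih =>
    cases j with
    | zero => simp only [List.set, rowCount_cons]; split <;> simp <;> omega
    | succ j => simp only [List.set, rowCount_cons]; have := ih j; omega

lemma rowCount_set_add (r : List Int) (j : Nat) (hj : j < r.length)
    (h12 : r.getD j 0 = 1 ∨ r.getD j 0 = 2) :
    pvRowCount (r.set j 3) + 1 = pvRowCount r := by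
  induction r generalizing j with
  | nil => simp at hj
  | cons a t ih =>
    cases j with
    | zero => simp_all [List.set, rowCount_cons]; omega
    | succ j =>
      simp only [List.set, rowCount_cons]
      simp only [List.length_cons] at hj
      simp only [List.getD_cons_succ] at h12
      have := ih j (by omega) h12
      omega

lemma count12_grid_set_le (g : List (List Int)) (n : Nat) (r' : List Int)
    (h : pvRowCount r' ≤ pvRowCount (g.getD n [])) :
    pvCount12 (g.set n r') ≤ pvCount12 g := by
  induction g generalizing n with
  | nil => simp [pvCount12]
  | cons a t ih =>
    cases n with
    | zero => simp_all [pvCount12]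
    | succ n =>
      simp only [List.set, pvCount12, List.map_cons, List.sum_cons]
      simp only [List.getD_cons_succ] at h
      have := ih n h
      simp only [pvCount12] at this
      omega

lemma count12_grid_set_lt (g : List (List Int)) (n : Nat) (r' : List Int)
    (hn : n < g.length) (h : pvRowCount r' < pvRowCount (g.getD n [])) :
    pvCount12 (g.set n r') < pvCount12 g := by
  induction g generalizing n with
  | nil => simp at hn
  | cons a t ih =>
    cases n with
    | zero => simp_all [pvCount12]
    | succ n =>
      simp only [List.set, pvCount12, List.map_cons, List.sum_cons]
      simp only [List.getD_cons_succ] at h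
      have := ih n (by simpa using by simp at hn; omega) h
      simp only [pvCount12] at this
      omega

lemma pvNat_of_nonneg (n : Int) (len : Nat) (h : 0 ≤ n) : pvNat n len = n.toNat := by
  unfold pvNat; rw [if_neg (by omega)]

lemma count12_set3_le (g : List (List Int)) (x y : Int) :
    pvCount12 (pvSet3 g x y 3) ≤ pvCount12 g :=
  count12_grid_set_le g (pvNat x g.length) _ (rowCount_set_le _ _)

lemma count12_set3_lt (g : List (List Int)) (x y : Int) (hx0 : 0 ≤ x) (hy0 : 0 ≤ y)
    (hx : x.toNat < g.length) (hy : y.toNat < (g.getD x.toNat []).length)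
    (h12 : pvCell g x y = 1 ∨ pvCell g x y = 2) :
    pvCount12 (pvSet3 g x y 3) < pvCount12 g := by
  unfold pvSet3
  rw [pvNat_of_nonneg x g.length hx0, pvNat_of_nonneg y _ hy0]
  apply count12_grid_set_lt g x.toNat _ hx
  have := rowCount_set_add (g.getD x.toNat []) y.toNat hy
    (by simpa [pvCell, pvNat_of_nonneg x g.length hx0, pvNat_of_nonneg y _ hy0] using h12)
  omega

lemma count12_pos (g : List (List Int)) (x y : Int) (hx0 : 0 ≤ x) (hy0 : 0 ≤ y)
    (hx : x.toNat < g.length) (hy : y.toNat < (g.getD x.toNat []).length)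
    (h12 : pvCell g x y = 1 ∨ pvCell g x y = 2) :
    1 ≤ pvCount12 g := by
  have h := count12_set3_lt g x y hx0 hy0 hx hy h12
  omega

-- shape lemmas
lemma shape_row_len (g : List (List Int)) (hs : Shape100 g) (n : Nat) (hn : n < g.length) :
    (g.getD n []).length = 100 := by
  rw [List.getD_eq_getElem g [] hn]
  exact hs.2 _ (List.getElem_mem hn)

lemma shape_set3 (g : List (List Int)) (x y : Int) (hs : Shape100 g) (hx0 : 0 ≤ x)
    (hx : x.toNat < g.length) :
    Shape100 (pvSet3 g x y 3) := by
  constructor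
  · simp [pvSet3, hs.1]
  · intro r hr
    unfold pvSet3 at hr
    rcases List.mem_or_eq_of_mem_set hr with h | h
    · exact hs.2 _ h
    · subst h; rw [List.length_set]
      rw [pvNat_of_nonneg x g.length hx0]
      exact shape_row_len g hs _ hx


-- values A can return
def ValGoStmt (f : Nat) : Prop := ∀ (st x y : Int) (g : List (List Int)) (k : Option Int)
    (g' : List (List Int)), dfsGo st f x y g = (some k, g') →
    k = none ∨ k = some (-1) ∨ k = some st
def ValLoopStmt (f : Nat) : Prop := ∀ (st x y : Int) (i : Nat) (g : List (List Int))
    (k : Option Int) (g' : List (List Int)), dfsLoop st f x y i g = (some k, g') →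
    k = none ∨ k = some (-1) ∨ k = some st

lemma valAll (f : Nat) : ValGoStmt f ∧ ValLoopStmt f := by
  induction f using Nat.strong_induction_on with
  | _ f IH =>
  have hGo : ValGoStmt f := by
    obtain _ | f' := f
    · intro st x y g k g' h
      rw [dfsGo] at h
      simp at h
    · intro st x y g k g' h
      rw [dfsGo] at h
      split at h
      · simp at h; right; right; exact h.1.symm
      · exact (IH f' (by omega)).2 st x y 0 _ k g' h
  refine ⟨hGo, ?_⟩
  have key : ∀ d (i : Nat), 3 < i + d → ∀ (st x y : Int) (g : List (List Int)) k g',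
      dfsLoop st f x y i g = (some k, g') → k = none ∨ k = some (-1) ∨ k = some st := by
    intro d
    induction d with
    | zero =>
      intro i hi st x y g k g' h
      rw [dfsLoop, dif_pos (by omega : 3 ≤ i)] at h
      simp at h; left; exact h.1.symm
    | succ d ihd =>
      intro i hi st x y g k g' h
      by_cases h3 : 3 ≤ i
      · rw [dfsLoop, dif_pos h3] at h; simp at h; left; exact h.1.symm
      · rw [dfsLoop, dif_neg h3] at h
        simp only at h
        split at h
        · simp at h; right; left; exact h.1.symm
        · split at h
          · split at h
            · simp at h
            · rename_i kc gc hE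
              split at h
              · simp at h; right; left; exact h.1.symm
              · split at h
                · simp at h; right; right; exact h.1.symm
                · exact ihd (i+1) (by omega) st x y gc k g' h
          · exact ihd (i+1) (by omega) st x y g k g' h
  intro st x y i g k g' h
  exact key 4 i (by omega) st x y g k g' h

-- fuel sufficiency for A's port
def SLoopStmt (n : Nat) : Prop := ∀ (st : Int) (f : Nat) (x y : Int) (i : Nat)
    (g : List (List Int)), Shape100 g → pvCount12 g ≤ n → n + 1 ≤ f →
    ∃ k g', dfsLoop st f x y i g = (some k, g') ∧ pvCount12 g' ≤ pvCount12 g ∧ Shape100 g'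

lemma sLoopAll (n : Nat) : SLoopStmt n := by
  induction n using Nat.strong_induction_on with
  | _ n IH =>
  have key : ∀ d (i : Nat), 3 < i + d → ∀ (st : Int) (f : Nat) (x y : Int) (g : List (List Int)),
      Shape100 g → pvCount12 g ≤ n → n + 1 ≤ f →
      ∃ k g', dfsLoop st f x y i g = (some k, g') ∧ pvCount12 g' ≤ pvCount12 g ∧ Shape100 g' := by
    intro d
    induction d with
    | zero =>
      intro i hi st f x y g hs hc hf
      exact ⟨none, g, by rw [dfsLoop, dif_pos (by omega : 3 ≤ i)], le_refl _, hs⟩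
    | succ d ihd =>
      intro i hi st f x y g hs hc hf
      by_cases h3 : 3 ≤ i
      · exact ⟨none, g, by rw [dfsLoop, dif_pos h3], le_refl _, hs⟩
      · rw [dfsLoop, dif_neg h3]
        simp only
        by_cases hnx : x + [0,0,1].getD i 0 = 100
        · rw [if_pos hnx]; exact ⟨some (-1), g, rfl, le_refl _, hs⟩
        · rw [if_neg hnx]
          by_cases hg : 0 ≤ x + [0,0,1].getD i 0 ∧ x + [0,0,1].getD i 0 < 100 ∧
              0 ≤ y + [1,-1,0].getD i 0 ∧ y + [1,-1,0].getD i 0 < 100 ∧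
              (pvCell g (x + [0,0,1].getD i 0) (y + [1,-1,0].getD i 0) = 1 ∨
               pvCell g (x + [0,0,1].getD i 0) (y + [1,-1,0].getD i 0) = 2)
          · rw [if_pos hg]
            generalize hnxd : x + [0,0,1].getD i 0 = nx at hg ⊢
            generalize hnyd : y + [1,-1,0].getD i 0 = ny at hg ⊢
            obtain ⟨h1, h2, h3', h4, h12⟩ := hg
            have hxv : nx.toNat < g.length := by rw [hs.1]; omega
            have hyv : ny.toNat < (g.getD nx.toNat []).length := by
              rw [shape_row_len g hs _ hxv]; omega
            obtain _ | f' := f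
            · omega
            · rw [dfsGo]
              by_cases hc2 : pvCell g nx ny = 2
              · rw [if_pos hc2]
                by_cases hstm : st = -1
                · exact ⟨some (-1), g, by simp [hstm], le_refl _, hs⟩
                · exact ⟨some st, g, by simp [hstm], le_refl _, hs⟩
              · rw [if_neg hc2]
                have hcnt : pvCount12 (pvSet3 g nx ny 3) < pvCount12 g :=
                  count12_set3_lt g nx ny h1 h3' hxv hyv h12
                have hpos : 1 ≤ pvCount12 g := count12_pos g nx ny h1 h3' hxv hyv h12
                have hsh1 : Shape100 (pvSet3 g nx ny 3) := shape_set3 g nx ny hs h1 hxv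
                obtain ⟨kc, gc, hE, hle, hshc⟩ :=
                  IH (n-1) (by omega) st f' nx ny 0 (pvSet3 g nx ny 3) hsh1 (by omega) (by omega)
                rw [hE]
                by_cases hk1 : kc = some (-1)
                · exact ⟨some (-1), gc, by simp [hk1], by omega, hshc⟩
                · by_cases hk2 : kc = some st
                  · exact ⟨some st, gc, by simp [hk2]; omega, by omega, hshc⟩
                  · obtain ⟨k2, g2, hE2, hle2, hsh2⟩ :=
                      ihd (i+1) (by omega) st (f'+1) x y gc hshc (by omega) (by omega)
                    exact ⟨k2, g2, by simp [hk1, hk2, hE2], by omega, hsh2⟩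
          · rw [if_neg hg]
            exact ihd (i+1) (by omega) st f x y g hs hc hf
  intro st f x y i g hs hc hf
  exact key 4 i (by omega) st f x y g hs hc hf

lemma sTop (st x y : Int) (g : List (List Int)) (hs : Shape100 g) (hx0 : 0 ≤ x)
    (hx1 : x < 100) (hy0 : 0 ≤ y) (hy1 : y < 100) :
    ∃ k g', dfsGo st (pvCount12 g + 2) x y g = (some k, g') := by
  rw [show pvCount12 g + 2 = (pvCount12 g + 1) + 1 from rfl, dfsGo]
  by_cases hc2 : pvCell g x y = 2
  · exact ⟨some st, g, by rw [if_pos hc2]⟩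
  · rw [if_neg hc2]
    have hxv : x.toNat < g.length := by rw [hs.1]; omega
    have hsh1 : Shape100 (pvSet3 g x y 3) := shape_set3 g x y hs hx0 hxv
    have hle : pvCount12 (pvSet3 g x y 3) ≤ pvCount12 g := count12_set3_le g x y
    obtain ⟨k, g', hE, _, _⟩ := sLoopAll (pvCount12 g) st (pvCount12 g + 1) x y 0
      (pvSet3 g x y 3) hsh1 (by omega) (by omega)
    exact ⟨k, g', hE⟩

-- one unfolding step of runB (definitional)
lemma runB_cons (st : Int) (m : Nat) (cx cy : Int) (i : Nat)
    (rest : List (Int × Int × Nat)) (g : List (List Int)) :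
    runB st (m + 1) ((cx, cy, i) :: rest) g =
      (if i = 0 ∧ pvCell g cx cy = 2 then some (some st)
       else
         let g1 := if i = 0 then pvSet3 g cx cy 3 else g
         if i = 3 then runB st m rest g1
         else
           let nx : Int := if i = 2 then cx + 1 else cx
           let ny : Int := if i = 0 then cy + 1 else if i = 1 then cy - 1 else cy
           if nx = 100 then some (some (-1))
           else if 0 ≤ nx ∧ nx < 100 ∧ 0 ≤ ny ∧ ny < 100 ∧
               (pvCell g1 nx ny = 1 ∨ pvCell g1 nx ny = 2) then
             runB st m ((nx, ny, 0) :: (cx, cy, i + 1) :: rest) g1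
           else runB st m ((cx, cy, i + 1) :: rest) g1) := rfl

lemma runB_nil (st : Int) (m : Nat) (g : List (List Int)) :
    runB st (m + 1) [] g = some none := rfl


-- dfsLoop unfolded at each concrete direction index
lemma dfsLoop_3 (st : Int) (f : Nat) (x y : Int) (g : List (List Int)) :
    dfsLoop st f x y 3 g = (some none, g) := by
  rw [dfsLoop, dif_pos (by omega : (3:Nat) ≤ 3)]

lemma dfsLoop_0 (st : Int) (f : Nat) (x y : Int) (g : List (List Int)) :
    dfsLoop st f x y 0 g =
      (if x = 100 then (some (some (-1)), g)
       else if 0 ≤ x ∧ x < 100 ∧ 0 ≤ y + 1 ∧ y + 1 < 100 ∧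
           (pvCell g x (y + 1) = 1 ∨ pvCell g x (y + 1) = 2) then
         match dfsGo st f x (y + 1) g with
         | (none, g') => (none, g')
         | (some k, g') =>
           if k = some (-1) then (some (some (-1)), g')
           else if k = some st then (some (some st), g')
           else dfsLoop st f x y 1 g'
       else dfsLoop st f x y 1 g) := by
  rw [dfsLoop, dif_neg (by omega : ¬ (3:Nat) ≤ 0)]
  simp only [show ([0,0,1] : List Int).getD 0 0 = 0 from rfl,
    show ([1,-1,0] : List Int).getD 0 0 = 1 from rfl]
  rw [show x + (0:Int) = x from by ring]

lemma dfsLoop_1 (st : Int) (f : Nat) (x y : Int) (g : List (List Int)) :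
    dfsLoop st f x y 1 g =
      (if x = 100 then (some (some (-1)), g)
       else if 0 ≤ x ∧ x < 100 ∧ 0 ≤ y - 1 ∧ y - 1 < 100 ∧
           (pvCell g x (y - 1) = 1 ∨ pvCell g x (y - 1) = 2) then
         match dfsGo st f x (y - 1) g with
         | (none, g') => (none, g')
         | (some k, g') =>
           if k = some (-1) then (some (some (-1)), g')
           else if k = some st then (some (some st), g')
           else dfsLoop st f x y 2 g'
       else dfsLoop st f x y 2 g) := by
  rw [dfsLoop, dif_neg (by omega : ¬ (3:Nat) ≤ 1)]
  simp only [show ([0,0,1] : List Int).getD 1 0 = 0 from rfl,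
    show ([1,-1,0] : List Int).getD 1 0 = -1 from rfl]
  rw [show x + (0:Int) = x from by ring, show y + (-1:Int) = y - 1 from by ring]

lemma dfsLoop_2 (st : Int) (f : Nat) (x y : Int) (g : List (List Int)) :
    dfsLoop st f x y 2 g =
      (if x + 1 = 100 then (some (some (-1)), g)
       else if 0 ≤ x + 1 ∧ x + 1 < 100 ∧ 0 ≤ y ∧ y < 100 ∧
           (pvCell g (x + 1) y = 1 ∨ pvCell g (x + 1) y = 2) then
         match dfsGo st f (x + 1) y g with
         | (none, g') => (none, g')
         | (some k, g') =>
           if k = some (-1) then (some (some (-1)), g')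
           else if k = some st then (some (some st), g')
           else dfsLoop st f x y 3 g'
       else dfsLoop st f x y 3 g) := by
  rw [dfsLoop, dif_neg (by omega : ¬ (3:Nat) ≤ 2)]
  simp only [show ([0,0,1] : List Int).getD 2 0 = 1 from rfl,
    show ([1,-1,0] : List Int).getD 2 0 = 0 from rfl]
  rw [show y + (0:Int) = y from by ring]

-- runB single-step lemmas (Nat-literal index conditions resolved)
lemma runB_cons0 (st : Int) (m : Nat) (x y : Int) (rest : List (Int × Int × Nat))
    (g : List (List Int)) :
    runB st (m + 1) ((x, y, 0) :: rest) g =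
      (if pvCell g x y = 2 then some (some st)
       else if x = 100 then some (some (-1))
       else if 0 ≤ x ∧ x < 100 ∧ 0 ≤ y + 1 ∧ y + 1 < 100 ∧
           (pvCell (pvSet3 g x y 3) x (y + 1) = 1 ∨ pvCell (pvSet3 g x y 3) x (y + 1) = 2) then
         runB st m ((x, y + 1, 0) :: (x, y, 1) :: rest) (pvSet3 g x y 3)
       else runB st m ((x, y, 1) :: rest) (pvSet3 g x y 3)) := by
  rw [runB_cons]
  simp only [show ((0:Nat) = 3) = False from by simp,
    show ((0:Nat) = 2) = False from by simp, show ((0:Nat) = 1) = False from by simp,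
    true_and, if_true, if_false]

lemma runB_cons1 (st : Int) (m : Nat) (x y : Int) (rest : List (Int × Int × Nat))
    (g : List (List Int)) :
    runB st (m + 1) ((x, y, 1) :: rest) g =
      (if x = 100 then some (some (-1))
       else if 0 ≤ x ∧ x < 100 ∧ 0 ≤ y - 1 ∧ y - 1 < 100 ∧
           (pvCell g x (y - 1) = 1 ∨ pvCell g x (y - 1) = 2) then
         runB st m ((x, y - 1, 0) :: (x, y, 2) :: rest) g
       else runB st m ((x, y, 2) :: rest) g) := by
  rw [runB_cons]
  simp only [show ((1:Nat) = 0) = False from by simp, show ((1:Nat) = 3) = False from by simp,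
    show ((1:Nat) = 2) = False from by simp,
    false_and, if_true, if_false]

lemma runB_cons2 (st : Int) (m : Nat) (x y : Int) (rest : List (Int × Int × Nat))
    (g : List (List Int)) :
    runB st (m + 1) ((x, y, 2) :: rest) g =
      (if x + 1 = 100 then some (some (-1))
       else if 0 ≤ x + 1 ∧ x + 1 < 100 ∧ 0 ≤ y ∧ y < 100 ∧
           (pvCell g (x + 1) y = 1 ∨ pvCell g (x + 1) y = 2) then
         runB st m ((x + 1, y, 0) :: (x, y, 3) :: rest) g
       else runB st m ((x, y, 3) :: rest) g) := by
  rw [runB_cons]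
  simp only [show ((2:Nat) = 0) = False from by simp, show ((2:Nat) = 3) = False from by simp,
    show ((2:Nat) = 1) = False from by simp,
    false_and, if_true, if_false]

lemma runB_s3 (st : Int) (m : Nat) (x y : Int) (rest : List (Int × Int × Nat))
    (g : List (List Int)) :
    runB st (m + 1) ((x, y, 3) :: rest) g = runB st m rest g := by
  rw [runB_cons]
  simp only [show ((3:Nat) = 0) = False from by simp,
    false_and, if_true, if_false]

-- simulation of A's recursion by B's stack machine
def SimGoStmt (f : Nat) : Prop := ∀ (st x y : Int) (g : List (List Int)) (k : Option Int)
    (g' : List (List Int)), dfsGo st f x y g = (some k, g') →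
    ∀ rest, ∃ s, s ≤ 5 ^ (f + 1) ∧ ∀ fB, runB st (s + fB) ((x, y, 0) :: rest) g =
      (match k with | some v => some (some v) | none => runB st fB rest g')
def SimLoopStmt (f : Nat) : Prop := ∀ (st x y : Int) (i : Nat) (g : List (List Int))
    (k : Option Int) (g' : List (List Int)), 1 ≤ i → i ≤ 3 →
    dfsLoop st f x y i g = (some k, g') →
    ∀ rest, ∃ s, s ≤ (4 - i) + (3 - i) * 5 ^ (f + 1) ∧
      ∀ fB, runB st (s + fB) ((x, y, i) :: rest) g =
        (match k with | some v => some (some v) | none => runB st fB rest g')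

lemma simAll (f : Nat) : SimGoStmt f ∧ SimLoopStmt f := by
  induction f using Nat.strong_induction_on with
  | _ f IH =>
  have hGo : SimGoStmt f := by
    obtain _ | f' := f
    · intro st x y g k g' h; rw [dfsGo] at h; simp at h
    · intro st x y g k g' h rest
      rw [dfsGo] at h
      by_cases hc2 : pvCell g x y = 2
      · rw [if_pos hc2] at h
        simp only [Prod.mk.injEq, Option.some.injEq] at h
        obtain ⟨hk, -⟩ := h; subst hk
        refine ⟨1, by have h5 : (5:Nat) ≤ 5 ^ (f' + 1) := Nat.le_self_pow (by omega) 5; have hp := pow_succ 5 (f' + 1); omega, fun fB => ?_⟩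
        rw [show 1 + fB = fB + 1 from by omega, runB_cons0, if_pos hc2]
      · rw [if_neg hc2] at h
        rw [dfsLoop_0] at h
        by_cases hnx : x = 100
        · rw [if_pos hnx] at h
          simp only [Prod.mk.injEq, Option.some.injEq] at h
          obtain ⟨hk, -⟩ := h; subst hk
          refine ⟨1, by have h5 : (5:Nat) ≤ 5 ^ (f' + 1) := Nat.le_self_pow (by omega) 5; have hp := pow_succ 5 (f' + 1); omega, fun fB => ?_⟩
          rw [show 1 + fB = fB + 1 from by omega, runB_cons0, if_neg hc2, if_pos hnx]
        · rw [if_neg hnx] at h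
          by_cases hgd : 0 ≤ x ∧ x < 100 ∧ 0 ≤ y + 1 ∧ y + 1 < 100 ∧
              (pvCell (pvSet3 g x y 3) x (y + 1) = 1 ∨ pvCell (pvSet3 g x y 3) x (y + 1) = 2)
          · rw [if_pos hgd] at h
            split at h
            · simp at h
            · rename_i kc gc hE
              obtain ⟨s_c, hs_c, hrun_c⟩ :=
                (IH f' (by omega)).1 st x (y + 1) (pvSet3 g x y 3) kc gc hE ((x, y, 1) :: rest)
              have hvc := (valAll f').1 st x (y + 1) (pvSet3 g x y 3) kc gc hE
              split at h
              · rename_i hk1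
                simp only [Prod.mk.injEq, Option.some.injEq] at h
                obtain ⟨hk, -⟩ := h; subst hk
                refine ⟨1 + s_c, by have h5 : (5:Nat) ≤ 5 ^ (f' + 1) := Nat.le_self_pow (by omega) 5; have hp := pow_succ 5 (f' + 1); omega, fun fB => ?_⟩
                rw [show (1 + s_c) + fB = (s_c + fB) + 1 from by omega, runB_cons0,
                  if_neg hc2, if_neg hnx, if_pos hgd, hrun_c fB, hk1]
              · split at h
                · rename_i hk1 hk2
                  simp only [Prod.mk.injEq, Option.some.injEq] at h
                  obtain ⟨hk, -⟩ := h; subst hk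
                  refine ⟨1 + s_c, by have h5 : (5:Nat) ≤ 5 ^ (f' + 1) := Nat.le_self_pow (by omega) 5; have hp := pow_succ 5 (f' + 1); omega, fun fB => ?_⟩
                  rw [show (1 + s_c) + fB = (s_c + fB) + 1 from by omega, runB_cons0,
                    if_neg hc2, if_neg hnx, if_pos hgd, hrun_c fB, hk2]
                · rename_i hk1 hk2
                  have hkc : kc = none := by rcases hvc with hv | hv | hv <;> tauto
                  subst hkc
                  obtain ⟨s2, hs2, hrun2⟩ :=
                    (IH f' (by omega)).2 st x y 1 gc k g' (by omega) (by omega) h rest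
                  refine ⟨1 + s_c + s2, by have h5 : (5:Nat) ≤ 5 ^ (f' + 1) := Nat.le_self_pow (by omega) 5; have hp := pow_succ 5 (f' + 1); omega, fun fB => ?_⟩
                  rw [show (1 + s_c + s2) + fB = (s_c + (s2 + fB)) + 1 from by omega, runB_cons0,
                    if_neg hc2, if_neg hnx, if_pos hgd, hrun_c (s2 + fB)]
                  exact hrun2 fB
          · rw [if_neg hgd] at h
            obtain ⟨s2, hs2, hrun2⟩ :=
              (IH f' (by omega)).2 st x y 1 (pvSet3 g x y 3) k g' (by omega) (by omega) h rest
            refine ⟨1 + s2, by have h5 : (5:Nat) ≤ 5 ^ (f' + 1) := Nat.le_self_pow (by omega) 5; have hp := pow_succ 5 (f' + 1); omega, fun fB => ?_⟩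
            rw [show (1 + s2) + fB = (s2 + fB) + 1 from by omega, runB_cons0,
              if_neg hc2, if_neg hnx, if_neg hgd]
            exact hrun2 fB
  refine ⟨hGo, ?_⟩
  have key : ∀ (d i : Nat), 3 < i + d → ∀ (st x y : Int) (g : List (List Int))
      (k : Option Int) (g' : List (List Int)), 1 ≤ i → i ≤ 3 →
      dfsLoop st f x y i g = (some k, g') →
      ∀ rest, ∃ s, s ≤ (4 - i) + (3 - i) * 5 ^ (f + 1) ∧
        ∀ fB, runB st (s + fB) ((x, y, i) :: rest) g =
          (match k with | some v => some (some v) | none => runB st fB rest g') := by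
    intro d
    induction d with
    | zero => intro i hi st x y g k g' h1 h2 h rest; omega
    | succ d ihd =>
      intro i hi st x y g k g' h1i hi3 h rest
      by_cases h3 : i = 3
      · subst h3
        rw [dfsLoop_3] at h
        simp only [Prod.mk.injEq, Option.some.injEq] at h
        obtain ⟨hk, hg'⟩ := h; subst hk; subst hg'
        refine ⟨1, by omega, fun fB => ?_⟩
        rw [show 1 + fB = fB + 1 from by omega, runB_s3]
      · have hi12 : i = 1 ∨ i = 2 := by omega
        rcases hi12 with hv1 | hv2
        · subst hv1
          rw [dfsLoop_1] at h
          by_cases hnx : x = 100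
          · rw [if_pos hnx] at h
            simp only [Prod.mk.injEq, Option.some.injEq] at h
            obtain ⟨hk, -⟩ := h; subst hk
            refine ⟨1, by omega, fun fB => ?_⟩
            rw [show 1 + fB = fB + 1 from by omega, runB_cons1, if_pos hnx]
          · rw [if_neg hnx] at h
            by_cases hgd : 0 ≤ x ∧ x < 100 ∧ 0 ≤ y - 1 ∧ y - 1 < 100 ∧ (pvCell g x (y - 1) = 1 ∨ pvCell g x (y - 1) = 2)
            · rw [if_pos hgd] at h
              split at h
              · simp at h
              · rename_i kc gc hE
                obtain ⟨s_c, hs_c, hrun_c⟩ := hGo st x (y - 1) g kc gc hE ((x, y, 2) :: rest)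
                have hvc := (valAll f).1 st x (y - 1) g kc gc hE
                split at h
                · rename_i hk1
                  simp only [Prod.mk.injEq, Option.some.injEq] at h
                  obtain ⟨hk, -⟩ := h; subst hk
                  refine ⟨1 + s_c, by omega, fun fB => ?_⟩
                  rw [show (1 + s_c) + fB = (s_c + fB) + 1 from by omega, runB_cons1,
                    if_neg hnx, if_pos hgd, hrun_c fB, hk1]
                · split at h
                  · rename_i hk1 hk2
                    simp only [Prod.mk.injEq, Option.some.injEq] at h
                    obtain ⟨hk, -⟩ := h; subst hk
                    refine ⟨1 + s_c, by omega, fun fB => ?_⟩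
                    rw [show (1 + s_c) + fB = (s_c + fB) + 1 from by omega, runB_cons1,
                      if_neg hnx, if_pos hgd, hrun_c fB, hk2]
                  · rename_i hk1 hk2
                    have hkc : kc = none := by rcases hvc with hv | hv | hv <;> tauto
                    subst hkc
                    obtain ⟨s2, hs2, hrun2⟩ :=
                      ihd 2 (by omega) st x y gc k g' (by omega) (by omega) h rest
                    refine ⟨1 + s_c + s2, by omega, fun fB => ?_⟩
                    rw [show (1 + s_c + s2) + fB = (s_c + (s2 + fB)) + 1 from by omega, runB_cons1,
                      if_neg hnx, if_pos hgd, hrun_c (s2 + fB)]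
                    exact hrun2 fB
            · rw [if_neg hgd] at h
              obtain ⟨s2, hs2, hrun2⟩ :=
                ihd 2 (by omega) st x y g k g' (by omega) (by omega) h rest
              refine ⟨1 + s2, by omega, fun fB => ?_⟩
              rw [show (1 + s2) + fB = (s2 + fB) + 1 from by omega, runB_cons1, if_neg hnx, if_neg hgd]
              exact hrun2 fB
        · subst hv2
          rw [dfsLoop_2] at h
          by_cases hnx : x + 1 = 100
          · rw [if_pos hnx] at h
            simp only [Prod.mk.injEq, Option.some.injEq] at h
            obtain ⟨hk, -⟩ := h; subst hk
            refine ⟨1, by omega, fun fB => ?_⟩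
            rw [show 1 + fB = fB + 1 from by omega, runB_cons2, if_pos hnx]
          · rw [if_neg hnx] at h
            by_cases hgd : 0 ≤ x + 1 ∧ x + 1 < 100 ∧ 0 ≤ y ∧ y < 100 ∧
                (pvCell g (x + 1) y = 1 ∨ pvCell g (x + 1) y = 2)
            · rw [if_pos hgd] at h
              split at h
              · simp at h
              · rename_i kc gc hE
                obtain ⟨s_c, hs_c, hrun_c⟩ := hGo st (x + 1) y g kc gc hE ((x, y, 3) :: rest)
                have hvc := (valAll f).1 st (x + 1) y g kc gc hE
                split at h
                · rename_i hk1
                  simp only [Prod.mk.injEq, Option.some.injEq] at h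
                  obtain ⟨hk, -⟩ := h; subst hk
                  refine ⟨1 + s_c, by omega, fun fB => ?_⟩
                  rw [show (1 + s_c) + fB = (s_c + fB) + 1 from by omega, runB_cons2,
                    if_neg hnx, if_pos hgd, hrun_c fB, hk1]
                · split at h
                  · rename_i hk1 hk2
                    simp only [Prod.mk.injEq, Option.some.injEq] at h
                    obtain ⟨hk, -⟩ := h; subst hk
                    refine ⟨1 + s_c, by omega, fun fB => ?_⟩
                    rw [show (1 + s_c) + fB = (s_c + fB) + 1 from by omega, runB_cons2,
                      if_neg hnx, if_pos hgd, hrun_c fB, hk2]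
                  · rename_i hk1 hk2
                    have hkc : kc = none := by rcases hvc with hv | hv | hv <;> tauto
                    subst hkc
                    obtain ⟨s2, hs2, hrun2⟩ :=
                      ihd 3 (by omega) st x y gc k g' (by omega) (by omega) h rest
                    refine ⟨1 + s_c + s2, by omega, fun fB => ?_⟩
                    rw [show (1 + s_c + s2) + fB = (s_c + (s2 + fB)) + 1 from by omega, runB_cons2,
                      if_neg hnx, if_pos hgd, hrun_c (s2 + fB)]
                    exact hrun2 fB
            · rw [if_neg hgd] at h
              obtain ⟨s2, hs2, hrun2⟩ :=
                ihd 3 (by omega) st x y g k g' (by omega) (by omega) h rest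
              refine ⟨1 + s2, by omega, fun fB => ?_⟩
              rw [show (1 + s2) + fB = (s2 + fB) + 1 from by omega, runB_cons2, if_neg hnx, if_neg hgd]
              exact hrun2 fB
  intro st x y i g k g' h1 h2 h rest
  exact key 4 i (by omega) st x y g k g' h1 h2 h rest

-- equality on the shallow class: the walk ends within one step, both ports follow it
lemma shallowCase (st x y : Int) (g : List (List Int))
    (hp : pvInb x g.length ∧ pvInb y (g.getD (pvNat x g.length) []).length ∧
      (pvCell g x y = 2 ∨
        (pvOkDir (pvSet3 g x y 3) x (y + 1) ∧ pvOkDir (pvSet3 g x y 3) x (y - 1) ∧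
         (x + 1 = 100 ∨ pvOkDir (pvSet3 g x y 3) (x + 1) y)))) :
    dfs x y g st = dfs_alt x y g st := by
  obtain ⟨hx, hy, hcase⟩ := hp
  have h5 : (5:Nat) ≤ 5 ^ (pvCount12 g + 4) := Nat.le_self_pow (by omega) 5
  by_cases hc2 : pvCell g x y = 2
  · have hA : dfs x y g st = some st := by
      unfold dfs
      rw [show pvCount12 g + 2 = (pvCount12 g + 1) + 1 from rfl, dfsGo, if_pos hc2]
    obtain ⟨m, hm⟩ : ∃ m, 5 ^ (pvCount12 g + 4) = m + 1 := ⟨5 ^ (pvCount12 g + 4) - 1, by omega⟩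
    have hB : runB st (5 ^ (pvCount12 g + 4)) [(x, y, 0)] g = some (some st) := by
      rw [hm, runB_cons0, if_pos hc2]
    rw [hA]; unfold dfs_alt; rw [hB]
  · have hrest := hcase.resolve_left hc2
    obtain ⟨hd0, hd1, hd2⟩ := hrest
    by_cases hx100 : x = 100
    · have hA : dfs x y g st = some (-1) := by
        unfold dfs
        rw [show pvCount12 g + 2 = (pvCount12 g + 1) + 1 from rfl, dfsGo, if_neg hc2,
          dfsLoop_0, if_pos hx100]
      obtain ⟨m, hm⟩ : ∃ m, 5 ^ (pvCount12 g + 4) = m + 1 := ⟨5 ^ (pvCount12 g + 4) - 1, by omega⟩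
      have hB : runB st (5 ^ (pvCount12 g + 4)) [(x, y, 0)] g = some (some (-1)) := by
        rw [hm, runB_cons0, if_neg hc2, if_pos hx100]
      rw [hA]; unfold dfs_alt; rw [hB]
    · -- direction 0 (right)
      by_cases hP0 : 0 ≤ x ∧ x < 100 ∧ 0 ≤ y + 1 ∧ y + 1 < 100 ∧
          (pvCell (pvSet3 g x y 3) x (y + 1) = 1 ∨ pvCell (pvSet3 g x y 3) x (y + 1) = 2)
      · -- guard passes; by pvOkDir the cell is a 2, so both return st
        have hv0 : pvCell (pvSet3 g x y 3) x (y + 1) = 2 := by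
          rcases hd0 with h | h
          · exact absurd ⟨hP0.1, hP0.2.1, hP0.2.2.1, hP0.2.2.2.1⟩ h
          · rcases hP0.2.2.2.2 with hv | hv
            · exact absurd hv h.2.2
            · exact hv
        have hA : dfs x y g st = some st := by
          unfold dfs
          rw [show pvCount12 g + 2 = (pvCount12 g + 1) + 1 from rfl, dfsGo, if_neg hc2,
            dfsLoop_0, if_neg hx100, if_pos hP0, dfsGo, if_pos hv0]
          by_cases hst : st = -1 <;> simp [hst]
        obtain ⟨m, hm⟩ : ∃ m, 5 ^ (pvCount12 g + 4) = (m + 1) + 1 := ⟨5 ^ (pvCount12 g + 4) - 2, by omega⟩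
        have hB : runB st (5 ^ (pvCount12 g + 4)) [(x, y, 0)] g = some (some st) := by
          rw [hm, runB_cons0, if_neg hc2, if_neg hx100, if_pos hP0, runB_cons0, if_pos hv0]
        rw [hA]; unfold dfs_alt; rw [hB]
      · -- direction 0 skipped
        have hL0 : dfsLoop st (pvCount12 g + 1) x y 0 (pvSet3 g x y 3) =
            dfsLoop st (pvCount12 g + 1) x y 1 (pvSet3 g x y 3) := by
          rw [dfsLoop_0, if_neg hx100, if_neg hP0]
        have hR0 : ∀ m, runB st (m + 1) [(x, y, 0)] g =
            runB st m [(x, y, 1)] (pvSet3 g x y 3) := fun m => by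
          rw [runB_cons0, if_neg hc2, if_neg hx100, if_neg hP0]
        -- direction 1 (left)
        by_cases hP1 : 0 ≤ x ∧ x < 100 ∧ 0 ≤ y - 1 ∧ y - 1 < 100 ∧
            (pvCell (pvSet3 g x y 3) x (y - 1) = 1 ∨ pvCell (pvSet3 g x y 3) x (y - 1) = 2)
        · have hv1 : pvCell (pvSet3 g x y 3) x (y - 1) = 2 := by
            rcases hd1 with h | h
            · exact absurd ⟨hP1.1, hP1.2.1, hP1.2.2.1, hP1.2.2.2.1⟩ h
            · rcases hP1.2.2.2.2 with hv | hv
              · exact absurd hv h.2.2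
              · exact hv
          have hA : dfs x y g st = some st := by
            unfold dfs
            rw [show pvCount12 g + 2 = (pvCount12 g + 1) + 1 from rfl, dfsGo, if_neg hc2, hL0,
              dfsLoop_1, if_neg hx100, if_pos hP1, dfsGo, if_pos hv1]
            by_cases hst : st = -1 <;> simp [hst]
          obtain ⟨m, hm⟩ : ∃ m, 5 ^ (pvCount12 g + 4) = ((m + 1) + 1) + 1 := ⟨5 ^ (pvCount12 g + 4) - 3, by omega⟩
          have hB : runB st (5 ^ (pvCount12 g + 4)) [(x, y, 0)] g = some (some st) := by
            rw [hm, hR0, runB_cons1, if_neg hx100, if_pos hP1, runB_cons0, if_pos hv1]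
          rw [hA]; unfold dfs_alt; rw [hB]
        · have hL1 : dfsLoop st (pvCount12 g + 1) x y 1 (pvSet3 g x y 3) =
              dfsLoop st (pvCount12 g + 1) x y 2 (pvSet3 g x y 3) := by
            rw [dfsLoop_1, if_neg hx100, if_neg hP1]
          have hR1 : ∀ m, runB st (m + 1) [(x, y, 1)] (pvSet3 g x y 3) =
              runB st m [(x, y, 2)] (pvSet3 g x y 3) := fun m => by
            rw [runB_cons1, if_neg hx100, if_neg hP1]
          -- direction 2 (down)
          by_cases hx1001 : x + 1 = 100
          · have hA : dfs x y g st = some (-1) := by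
              unfold dfs
              rw [show pvCount12 g + 2 = (pvCount12 g + 1) + 1 from rfl, dfsGo, if_neg hc2,
                hL0, hL1, dfsLoop_2, if_pos hx1001]
            obtain ⟨m, hm⟩ : ∃ m, 5 ^ (pvCount12 g + 4) = ((m + 1) + 1) + 1 := ⟨5 ^ (pvCount12 g + 4) - 3, by omega⟩
            have hB : runB st (5 ^ (pvCount12 g + 4)) [(x, y, 0)] g = some (some (-1)) := by
              rw [hm, hR0, hR1, runB_cons2, if_pos hx1001]
            rw [hA]; unfold dfs_alt; rw [hB]
          · have hd2' := hd2.resolve_left hx1001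
            by_cases hP2 : 0 ≤ x + 1 ∧ x + 1 < 100 ∧ 0 ≤ y ∧ y < 100 ∧
                (pvCell (pvSet3 g x y 3) (x + 1) y = 1 ∨ pvCell (pvSet3 g x y 3) (x + 1) y = 2)
            · have hv2 : pvCell (pvSet3 g x y 3) (x + 1) y = 2 := by
                rcases hd2' with h | h
                · exact absurd ⟨hP2.1, hP2.2.1, hP2.2.2.1, hP2.2.2.2.1⟩ h
                · rcases hP2.2.2.2.2 with hv | hv
                  · exact absurd hv h.2.2
                  · exact hv
              have hA : dfs x y g st = some st := by
                unfold dfs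
                rw [show pvCount12 g + 2 = (pvCount12 g + 1) + 1 from rfl, dfsGo, if_neg hc2,
                  hL0, hL1, dfsLoop_2, if_neg hx1001, if_pos hP2, dfsGo, if_pos hv2]
                by_cases hst : st = -1 <;> simp [hst]
              obtain ⟨m, hm⟩ : ∃ m, 5 ^ (pvCount12 g + 4) = (((m + 1) + 1) + 1) + 1 :=
                ⟨5 ^ (pvCount12 g + 4) - 4, by omega⟩
              have hB : runB st (5 ^ (pvCount12 g + 4)) [(x, y, 0)] g = some (some st) := by
                rw [hm, hR0, hR1, runB_cons2, if_neg hx1001, if_pos hP2, runB_cons0, if_pos hv2]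
              rw [hA]; unfold dfs_alt; rw [hB]
            · -- every direction skipped: both return None
              have hA : dfs x y g st = none := by
                unfold dfs
                rw [show pvCount12 g + 2 = (pvCount12 g + 1) + 1 from rfl, dfsGo, if_neg hc2,
                  hL0, hL1, dfsLoop_2, if_neg hx1001, if_neg hP2, dfsLoop_3]
              obtain ⟨m, hm⟩ : ∃ m, 5 ^ (pvCount12 g + 4) = ((((m + 1) + 1) + 1) + 1) + 1 :=
                ⟨5 ^ (pvCount12 g + 4) - 5, by omega⟩
              have hB : runB st (5 ^ (pvCount12 g + 4)) [(x, y, 0)] g = some none := by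
                rw [hm, hR0, hR1, runB_cons2, if_neg hx1001, if_neg hP2, runB_s3, runB_nil]
              rw [hA]; unfold dfs_alt; rw [hB]

-- ===== VERDICT (by name: the statement is the Claim_ definition above) =====
theorem dfs_spec : Claim_equal_dfs := by
  intro x y g st hdom hpre
  unfold Spec_dfs
  rcases hpre with ⟨hs, hx0, hx1, hy0, hy1⟩ | hsh
  swap
  · exact shallowCase st x y g hsh
  obtain ⟨k, g1, hA⟩ := sTop st x y g hs hx0 hx1 hy0 hy1
  have hdfs : dfs x y g st = k := by unfold dfs; rw [hA]
  obtain ⟨s, hs, hrun⟩ := (simAll (pvCount12 g + 2)).1 st x y g k g1 hA []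
  have hs' : s ≤ 5 ^ (pvCount12 g + 3) := by
    rw [show pvCount12 g + 3 = pvCount12 g + 2 + 1 from by omega]; exact hs
  have hFB : s + 1 ≤ 5 ^ (pvCount12 g + 4) := by
    have h1 : (5:Nat) ≤ 5 ^ (pvCount12 g + 3) := Nat.le_self_pow (by omega) 5
    have h2 : (5:Nat) ^ (pvCount12 g + 4) = 5 ^ (pvCount12 g + 3) * 5 := by ring
    omega
  have hmain := hrun (5 ^ (pvCount12 g + 4) - s)
  rw [show s + (5 ^ (pvCount12 g + 4) - s) = 5 ^ (pvCount12 g + 4) from by omega] at hmain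
  cases k with
  | some v =>
    rw [hdfs]
    unfold dfs_alt
    rw [hmain]
  | none =>
    obtain ⟨m, hm⟩ : ∃ m, 5 ^ (pvCount12 g + 4) - s = m + 1 :=
      ⟨5 ^ (pvCount12 g + 4) - s - 1, by omega⟩
    rw [hm, runB_nil] at hmain
    rw [hdfs]
    unfold dfs_alt
    rw [hmain]
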